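-- pv_equiv track=rewrite | github.com/andromedalactea/tasks_about_complex | Nombredelalumno.py | calcular_numeros_betti
-- ===== SOURCE A (Python) =====
-- def calcular_numeros_betti(simplices):
--     """
--     Calcular los números de Betti b0 y b1 para un complejo simplicial en el plano utilizando el algoritmo incremental.
--
--     Parámetros:
--     simplices (lista de tuplas): Lista de símplices, donde cada símplice es una tupla de vértices.
--
--     Devuelve:
--     tupla: Una tupla que contiene los números de Betti b0 y b1.
--     """
--     # Inicialización de los números de Betti
--     b0 = 0  # Número de componentes conectadas
--     b1 = 0  # Número de agujeros unidimensionales (ciclos)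
--
--     # Funciones auxiliares
--     def find_set(vertex, parent):
--         """
--         Encontrar el representante del conjunto que contiene el vértice dado.
--         Implementa la parte 'find' del algoritmo Union-Find.
--         """
--         if parent[vertex] != vertex:
--             parent[vertex] = find_set(parent[vertex], parent)
--         return parent[vertex]
--
--     def union_sets(u, v, parent, rank):
--         """
--         Fusionar los conjuntos que contienen u y v.
--         Implementa la parte 'union' del algoritmo Union-Find.
--         """
--         u_root = find_set(u, parent)
--         v_root = find_set(v, parent)
--
--         if u_root != v_root:
--             # Fusionar el conjunto más pequeño en el más grande para mantener el árbol poco profundo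
--             if rank[u_root] < rank[v_root]:
--                 parent[u_root] = v_root
--             elif rank[u_root] > rank[v_root]:
--                 parent[v_root] = u_root
--             else:
--                 parent[v_root] = u_root
--                 rank[u_root] += 1
--             return True  # Indica que ocurrió una fusión
--         return False
--
--     # Extraer vértices de los símplices
--     vertices = set()
--     for simplex in simplices:
--         vertices.update(simplex)
--
--     # Inicializar las estructuras de Union-Find
--     parent = {vertex: vertex for vertex in vertices}
--     rank = {vertex: 0 for vertex in vertices}
--
--     # Procesar cada símplice
--     for simplex in simplices:
--         if len(simplex) == 1:
--             b0 += 1  # Contar cada vértice como una nueva componente conectada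
--         elif len(simplex) == 2:
--             # Si la arista conecta dos componentes previamente separadas, disminuir b0
--             if union_sets(simplex[0], simplex[1], parent, rank):
--                 b0 -= 1
--             else:
--                 # La arista forma un ciclo, aumentar b1
--                 b1 += 1
--
--     return b0, b1
-- ===== SOURCE B (Python) =====
-- def calcular_numeros_betti(simplices):
--     """Betti b0, b1 via label propagation: one pass splits simplices into
--     point count and edge list, then each edge merges label classes by
--     rewriting one class's label; merges are counted once at the end."""
--     n1 = 0
--     edges = []
--     for s in simplices:
--         if len(s) == 1:
--             n1 += 1
--         elif len(s) == 2:
--             edges.append((s[0], s[1]))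
--     label = {}
--     merges = 0
--     for a, b in edges:
--         la = label.setdefault(a, a)
--         lb = label.setdefault(b, b)
--         if la != lb:
--             merges += 1
--             label = {v: (la if l == lb else l) for v, l in label.items()}
--     return n1 - merges, len(edges) - merges
-- ===== Notes on version B (the rewrite author's own statement) =====
-- stated objective: alternative
-- what changed: A interleaves an incremental Union-Find (parent/rank dicts, recursive find with path compression) with the simplex scan; B first splits the simplices into a point count and an edge list in one pass, then merges components by label propagation (rewriting one class label per connecting edge) and derives b0 and b1 from the single merge count in closed form.
import Mathlib
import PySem

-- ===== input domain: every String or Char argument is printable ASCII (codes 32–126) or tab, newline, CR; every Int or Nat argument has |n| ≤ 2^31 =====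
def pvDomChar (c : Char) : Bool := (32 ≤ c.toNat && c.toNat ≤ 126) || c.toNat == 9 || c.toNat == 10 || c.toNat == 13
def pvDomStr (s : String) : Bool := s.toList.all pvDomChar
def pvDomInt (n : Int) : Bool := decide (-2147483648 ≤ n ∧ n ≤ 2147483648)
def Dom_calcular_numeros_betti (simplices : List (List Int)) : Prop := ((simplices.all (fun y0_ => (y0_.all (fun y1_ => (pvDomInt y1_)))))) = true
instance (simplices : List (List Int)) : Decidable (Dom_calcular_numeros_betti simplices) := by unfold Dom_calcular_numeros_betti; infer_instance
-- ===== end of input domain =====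

-- B replaces the incremental Union-Find (rank + path compression) with one splitting
-- pass followed by label-propagation merging and a closed-form count (objective: alternative).

-- ===== PORT A =====
-- find_set with path compression; the recursion is fueled (Python recurses on the parent
-- forest, which A keeps acyclic; fuel = dict size suffices, proved in the lemmas below).
-- parent[vertex] is ported as getD vertex vertex: A only ever looks up existing keys.
def pvFindSet (fuel : Nat) (vertex : Int) (parent : PySem.Dict Int Int) :
    Int × PySem.Dict Int Int :=
  match fuel with
  | 0 => (vertex, parent)
  | f + 1 =>
    let pv := parent.getD vertex vertex
    if pv ≠ vertex then
      let res := pvFindSet f pv parent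
      let parent' := res.2.insert vertex res.1
      (parent'.getD vertex vertex, parent')
    else (parent.getD vertex vertex, parent)

def pvUnionSets (u v : Int) (parent rank : PySem.Dict Int Int) :
    Bool × PySem.Dict Int Int × PySem.Dict Int Int :=
  let r1 := pvFindSet parent.size u parent
  let uRoot := r1.1
  let p1 := r1.2
  let r2 := pvFindSet p1.size v p1
  let vRoot := r2.1
  let p2 := r2.2
  if uRoot ≠ vRoot then
    if rank.getD uRoot 0 < rank.getD vRoot 0 then (true, p2.insert uRoot vRoot, rank)
    else if rank.getD uRoot 0 > rank.getD vRoot 0 then (true, p2.insert vRoot uRoot, rank)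
    else (true, p2.insert vRoot uRoot, rank.insert uRoot (rank.getD uRoot 0 + 1))
  else (false, p2, rank)

-- the body of A's main loop over simplices
def pvStepA (st : Int × Int × PySem.Dict Int Int × PySem.Dict Int Int) (simplex : List Int) :
    Int × Int × PySem.Dict Int Int × PySem.Dict Int Int :=
  let (b0, b1, p, rk) := st
  if simplex.length == 1 then (b0 + 1, b1, p, rk)
  else if simplex.length == 2 then
    let r := pvUnionSets (PySem.List.pyGetD simplex 0 0) (PySem.List.pyGetD simplex 1 0) p rk
    if r.1 then (b0 - 1, b1, r.2.1, r.2.2) else (b0, b1 + 1, r.2.1, r.2.2)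
  else st

def calcular_numeros_betti (simplices : List (List Int)) : Int × Int :=
  let vertices : PySem.Set Int :=
    simplices.foldl (fun s simplex => simplex.foldl PySem.Set.add s) ([] : PySem.Set Int)
  let parent := vertices.foldl (fun d x => d.insert x x) PySem.Dict.empty
  let rank := vertices.foldl (fun d x => d.insert x (0 : Int)) PySem.Dict.empty
  let st := simplices.foldl pvStepA (0, 0, parent, rank)
  (st.1, st.2.1)

-- ===== PORT B =====
-- first pass: count the 1-simplices and collect the 2-simplices as an edge list
def pvSplit (st : Int × List (Int × Int)) (s : List Int) : Int × List (Int × Int) :=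
  if s.length == 1 then (st.1 + 1, st.2)
  else if s.length == 2 then
    (st.1, st.2 ++ [(PySem.List.pyGetD s 0 0, PySem.List.pyGetD s 1 0)])
  else st

-- one edge of the label-propagation loop: label.setdefault twice, then, if the two
-- labels differ, rewrite the whole class of lb to la (the dict comprehension)
def pvMergeStep (st : PySem.Dict Int Int × Int) (e : Int × Int) : PySem.Dict Int Int × Int :=
  let (label, merges) := st
  let label1 := label.setdefault e.1 e.1
  let la := label1.getD e.1 e.1
  let label2 := label1.setdefault e.2 e.2
  let lb := label2.getD e.2 e.2
  if la ≠ lb then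
    (PySem.Dict.mk (label2.items.map (fun kv => (kv.1, if kv.2 == lb then la else kv.2))),
     merges + 1)
  else (label2, merges)

def calcular_numeros_betti_alt (simplices : List (List Int)) : Int × Int :=
  let split := simplices.foldl pvSplit ((0 : Int), ([] : List (Int × Int)))
  let n1 := split.1
  let edges := split.2
  let final := edges.foldl pvMergeStep (PySem.Dict.empty, (0 : Int))
  let merges := final.2
  (n1 - merges, (edges.length : Int) - merges)

-- ===== PRECONDITION & SPEC =====
def Spec_calcular_numeros_betti (simplices : List (List Int)) (out : Int × Int) : Prop := out = calcular_numeros_betti_alt simplices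
instance (simplices : List (List Int)) (out : Int × Int) : Decidable (Spec_calcular_numeros_betti simplices out) := by unfold Spec_calcular_numeros_betti; infer_instance

-- ===== CLAIM (what is proved, stated in full; the proofs are below) =====
def Claim_equal_calcular_numeros_betti : Prop := ∀ (simplices : List (List Int)), Dom_calcular_numeros_betti simplices → Spec_calcular_numeros_betti simplices (calcular_numeros_betti simplices)

-- ===== LEMMAS AND PROOFS =====

-- `pf d v` is d.get(v, v): the parent (resp. label) function both programs maintain
def pf (d : PySem.Dict Int Int) (v : Int) : Int := d.getD v v

-- `parent` is a forest: ρ is its root map, dep a measure strictly decreasing along edges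
def Forest (p : PySem.Dict Int Int) (ρ : Int → Int) (dep : Int → Nat) : Prop :=
  ∀ v, (pf p v = v → ρ v = v) ∧ (pf p v ≠ v → ρ v = ρ (pf p v) ∧ dep (pf p v) < dep v)

-- keys are closed under the parent/label function
def Closed (d : PySem.Dict Int Int) : Prop :=
  ∀ v, d.contains v = true → d.contains (pf d v) = true

-- enough fuel to reach a root from v
def okFuel (p : PySem.Dict Int Int) : Nat → Int → Prop
  | 0, v => pf p v = v
  | n + 1, v => pf p v = v ∨ okFuel p n (pf p v)

-- ρ' merges the ρ-classes of a and b, and nothing else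
def MergeRel (ρ ρ' : Int → Int) (a b : Int) : Prop :=
  ∀ x y, ρ' x = ρ' y ↔ (ρ x = ρ y ∨ ((ρ x = a ∨ ρ x = b) ∧ (ρ y = a ∨ ρ y = b)))

-- the joint invariant tying A's union-find state to B's label dict
def LinkedInv (p lab : PySem.Dict Int Int) : Prop :=
  ∃ ρ dep, Forest p ρ dep ∧ Closed p ∧ Closed lab ∧
    (∀ x y, ρ x = ρ y ↔ pf lab x = pf lab y)

lemma pf_not_contains (d : PySem.Dict Int Int) (v : Int) (h : d.contains v = false) :
    pf d v = v := by
  unfold pf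
  simp only [PySem.Dict.getD, PySem.Dict.get?]
  have hnone : d.items.find? (fun p => p.1 == v) = none := by
    rw [List.find?_eq_none]
    intro x hx
    simp only [PySem.Dict.contains, List.any_eq_false] at h
    exact h x hx
  rw [hnone]
  rfl

lemma contains_of_pf_ne (d : PySem.Dict Int Int) (v : Int) (h : pf d v ≠ v) :
    d.contains v = true := by
  cases hc : d.contains v with
  | true => rfl
  | false => exact absurd (pf_not_contains d v hc) h

lemma pf_insert (d : PySem.Dict Int Int) (k r x : Int) :
    pf (d.insert k r) x = if x = k then r else pf d x := by
  unfold pf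
  by_cases hx : x = k
  · subst hx
    rw [PySem.Dict.getD_insert_self]
    simp
  · rw [PySem.Dict.getD_insert_of_ne _ _ _ hx]
    simp [hx]

lemma contains_iff_mem_keys (d : PySem.Dict Int Int) (x : Int) :
    d.contains x = true ↔ x ∈ d.keys := by
  simp only [PySem.Dict.contains, PySem.Dict.keys, List.any_eq_true, List.mem_map,
    beq_iff_eq]

lemma rho_root {p : PySem.Dict Int Int} {ρ : Int → Int} {dep : Int → Nat}
    (h : Forest p ρ dep) :
    ∀ v, pf p (ρ v) = ρ v ∧ dep (ρ v) ≤ dep v ∧ ρ (ρ v) = ρ v := by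
  intro v
  induction hn : dep v using Nat.strong_induction_on generalizing v with
  | _ n ih =>
    by_cases hr : pf p v = v
    · have hv : ρ v = v := (h v).1 hr
      rw [hv]
      exact ⟨hr, by omega, hv⟩
    · obtain ⟨hρ, hdep⟩ := (h v).2 hr
      subst hn
      have := ih (dep (pf p v)) hdep (pf p v) rfl
      rw [hρ]
      exact ⟨this.1, le_trans this.2.1 (le_of_lt hdep), this.2.2⟩

lemma contains_rho {p : PySem.Dict Int Int} {ρ : Int → Int} {dep : Int → Nat}
    (h : Forest p ρ dep) (hc : Closed p) :
    ∀ v, p.contains v = true → p.contains (ρ v) = true := by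
  intro v
  induction hn : dep v using Nat.strong_induction_on generalizing v with
  | _ n ih =>
    intro hv
    by_cases hr : pf p v = v
    · rw [(h v).1 hr]
      exact hv
    · obtain ⟨hρ, hdep⟩ := (h v).2 hr
      subst hn
      rw [hρ]
      exact ih (dep (pf p v)) hdep (pf p v) rfl (hc v hv)

lemma okFuel_root {p v} (h : pf p v = v) : ∀ n, okFuel p n v := by
  intro n
  cases n with
  | zero => exact h
  | succ m => exact Or.inl h

lemma fuel_enough {p : PySem.Dict Int Int} {ρ : Int → Int} {dep : Int → Nat}
    (hF : Forest p ρ dep) (hC : Closed p) :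
    ∀ v, p.contains v = true → okFuel p p.size v := by
  suffices H : ∀ n v (seen : List Int), dep v = n → seen.Nodup →
      (∀ x ∈ seen, p.contains x = true ∧ dep v < dep x) → p.contains v = true →
      okFuel p (p.size - seen.length) v by
    intro v hv
    simpa using H (dep v) v [] rfl (by simp) (by simp) hv
  intro n
  induction n using Nat.strong_induction_on with
  | _ n ih =>
    intro v seen hdep hnd hseen hv
    by_cases hroot : pf p v = v
    · exact okFuel_root hroot _
    · obtain ⟨hρ, hlt⟩ := (hF v).2 hroot
      have hvnotin : v ∉ seen := by
        intro hmem
        exact absurd (hseen v hmem).2 (lt_irrefl _)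
      have hnd' : (v :: seen).Nodup := List.nodup_cons.2 ⟨hvnotin, hnd⟩
      have hsub : (v :: seen) ⊆ p.keys := by
        intro x hx
        rcases List.mem_cons.1 hx with hx | hx
        · subst hx
          exact (contains_iff_mem_keys p x).1 hv
        · exact (contains_iff_mem_keys p x).1 (hseen x hx).1
      have hlen : seen.length + 1 ≤ p.size := by
        have hle := (List.Nodup.subperm hnd' hsub).length_le
        have hkl : p.keys.length = p.size := by
          simp [PySem.Dict.keys, PySem.Dict.size]
        simpa [hkl] using hle
      have hrec := ih (dep (pf p v)) (by omega) (pf p v) (v :: seen) rfl hnd'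
        (by
          intro x hx
          rcases List.mem_cons.1 hx with hx | hx
          · subst hx
            exact ⟨hv, hlt⟩
          · exact ⟨(hseen x hx).1, lt_trans hlt (hseen x hx).2⟩)
        (hC v hv)
      have hsz : p.size - seen.length = (p.size - (v :: seen).length) + 1 := by
        simp only [List.length_cons]
        omega
      rw [hsz]
      exact Or.inr hrec

lemma getD_eq_pf (q : PySem.Dict Int Int) (w : Int) : q.getD w w = pf q w := rfl

lemma pvFindSet_succ (f : Nat) (v : Int) (p : PySem.Dict Int Int) :
    pvFindSet (f + 1) v p =
      if p.getD v v ≠ v then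
        (((pvFindSet f (p.getD v v) p).2.insert v (pvFindSet f (p.getD v v) p).1).getD v v,
          (pvFindSet f (p.getD v v) p).2.insert v (pvFindSet f (p.getD v v) p).1)
      else (p.getD v v, p) := rfl

lemma find_spec {ρ : Int → Int} {dep : Int → Nat} :
    ∀ (fuel : Nat) (p : PySem.Dict Int Int) (v : Int), Forest p ρ dep → Closed p →
      okFuel p fuel v →
      (pvFindSet fuel v p).1 = ρ v ∧ Forest (pvFindSet fuel v p).2 ρ dep ∧
        Closed (pvFindSet fuel v p).2 ∧
        (∀ x, (pvFindSet fuel v p).2.contains x = p.contains x) := by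
  intro fuel
  induction fuel with
  | zero =>
    intro p v hF hC hok
    have hv : ρ v = v := (hF v).1 hok
    exact ⟨hv.symm, hF, hC, fun x => rfl⟩
  | succ f ih =>
    intro p v hF hC hok
    by_cases hr : pf p v = v
    · have hv : ρ v = v := (hF v).1 hr
      have hred : pvFindSet (f + 1) v p = (p.getD v v, p) := by
        rw [pvFindSet_succ, if_neg (by simpa [pf] using hr)]
      rw [hred]
      refine ⟨?_, hF, hC, fun x => rfl⟩
      show pf p v = ρ v
      rw [hr, hv]
    · have hok' : okFuel p f (pf p v) := by
        cases hok with
        | inl h => exact absurd h hr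
        | inr h => exact h
      obtain ⟨hρe, hdep⟩ := (hF v).2 hr
      have IH := ih p (pf p v) hF hC hok'
      have hred : pvFindSet (f + 1) v p =
          (((pvFindSet f (pf p v) p).2.insert v (pvFindSet f (pf p v) p).1).getD v v,
            (pvFindSet f (pf p v) p).2.insert v (pvFindSet f (pf p v) p).1) := by
        rw [pvFindSet_succ, if_pos (by simpa [pf] using hr)]
        simp only [getD_eq_pf]
      rw [hred]
      set q := (pvFindSet f (pf p v) p).2 with hq
      set r := (pvFindSet f (pf p v) p).1 with hrv
      have hr1 : r = ρ v := by rw [IH.1, hρe]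
      have hval : pf (q.insert v r) v = ρ v := by
        rw [pf_insert]
        simp [hr1]
      have hrhone : ρ v ≠ v := by
        intro hcon
        have := (rho_root hF v).1
        rw [hcon] at this
        exact hr this
      have hcv : p.contains v = true := contains_of_pf_ne p v hr
      have hcont : ∀ y, (q.insert v r).contains y = p.contains y := by
        intro y
        rw [PySem.Dict.contains_insert]
        by_cases hy : y = v
        · subst hy
          simp [hcv]
        · simp [hy, IH.2.2.2 y]
      refine ⟨hval, ?_, ?_, hcont⟩
      · intro x
        by_cases hx : x = v
        · subst hx
          constructor
          · intro h1
            rw [hval] at h1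
            exact absurd h1 hrhone
          · intro _
            rw [hval]
            refine ⟨(rho_root hF x).2.2.symm, ?_⟩
            have h2 := (rho_root hF (pf p x)).2.1
            rw [← hρe] at h2
            exact lt_of_le_of_lt h2 hdep
        · have hpf : pf (q.insert v r) x = pf q x := by
            rw [pf_insert, if_neg hx]
          rw [hpf]
          constructor
          · intro h1
            exact (IH.2.1 x).1 h1
          · intro h1
            exact (IH.2.1 x).2 h1
      · intro x hx
        by_cases hxv : x = v
        · subst hxv
          rw [hval, hcont]
          exact contains_rho hF hC x hcv
        · have hpf : pf (q.insert v r) x = pf q x := by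
            rw [pf_insert, if_neg hxv]
          rw [hpf, hcont]
          rw [← IH.2.2.2]
          apply IH.2.2.1
          rw [IH.2.2.2]
          rw [hcont x] at hx
          exact hx

lemma link_spec {p : PySem.Dict Int Int} {ρ : Int → Int} {dep : Int → Nat}
    (a b : Int) (hF : Forest p ρ dep) (hC : Closed p)
    (ha : pf p a = a) (hb : pf p b = b) (hab : a ≠ b)
    (hca : p.contains a = true) (hcb : p.contains b = true) :
    Forest (p.insert a b) (fun x => if ρ x = a then b else ρ x)
        (fun x => if ρ x = a then dep x + dep b + 1 else dep x) ∧
      Closed (p.insert a b) ∧ (∀ x, (p.insert a b).contains x = p.contains x) ∧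
      MergeRel ρ (fun x => if ρ x = a then b else ρ x) a b := by
  have hρa : ρ a = a := (hF a).1 ha
  have hρb : ρ b = b := (hF b).1 hb
  have hba : ρ b ≠ a := by rw [hρb]; exact fun h => hab h.symm
  have hcont : ∀ x, (p.insert a b).contains x = p.contains x := by
    intro x
    rw [PySem.Dict.contains_insert]
    by_cases hx : x = a
    · subst hx
      simp [hca]
    · simp [hx]
  refine ⟨?_, ?_, hcont, ?_⟩
  · intro x
    dsimp only
    by_cases hx : x = a
    · subst hx
      have hpf : pf (p.insert x b) x = b := by
        rw [pf_insert]
        simp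
      rw [hpf]
      constructor
      · intro h1
        exact absurd h1.symm hab
      · intro _
        constructor
        · rw [if_pos hρa, if_neg hba]
          exact hρb.symm
        · rw [if_neg hba, if_pos hρa]
          omega
    · have hpf : pf (p.insert a b) x = pf p x := by
        rw [pf_insert, if_neg hx]
      rw [hpf]
      constructor
      · intro h1
        have hx1 : ρ x = x := (hF x).1 h1
        rw [hx1, if_neg hx]
      · intro h1
        obtain ⟨h2, h3⟩ := (hF x).2 h1
        rw [h2]
        constructor
        · rfl
        · split_ifs <;> omega
  · intro x hx
    rw [hcont] at hx
    by_cases hxa : x = a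
    · subst hxa
      have hpf : pf (p.insert x b) x = b := by
        rw [pf_insert]
        simp
      rw [hpf, hcont]
      exact hcb
    · have hpf : pf (p.insert a b) x = pf p x := by
        rw [pf_insert, if_neg hxa]
      rw [hpf, hcont]
      exact hC x hx
  · intro x y
    dsimp only
    by_cases hx : ρ x = a <;> by_cases hy : ρ y = a
    · rw [if_pos hx, if_pos hy]
      simp [hx, hy]
    · rw [if_pos hx, if_neg hy]
      constructor
      · intro h
        exact Or.inr ⟨Or.inl hx, Or.inr h.symm⟩
      · rintro (h | ⟨h1, h2 | h2⟩)
        · exact absurd (h.symm.trans hx) hy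
        · exact absurd h2 hy
        · exact h2.symm
    · rw [if_neg hx, if_pos hy]
      constructor
      · intro h
        exact Or.inr ⟨Or.inr h, Or.inl hy⟩
      · rintro (h | ⟨h1 | h1, h2⟩)
        · exact absurd (h.trans hy) hx
        · exact absurd h1 hx
        · exact h1
    · rw [if_neg hx, if_neg hy]
      constructor
      · intro h
        exact Or.inl h
      · rintro (h | ⟨h1 | h1, h2 | h2⟩)
        · exact h
        · exact absurd h1 hx
        · exact absurd h1 hx
        · exact absurd h2 hy
        · exact h1.trans h2.symm

lemma mergeRel_symm {ρ ρ' : Int → Int} {a b : Int} (h : MergeRel ρ ρ' a b) :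
    MergeRel ρ ρ' b a := by
  intro x y
  rw [h x y]
  tauto

lemma union_spec {p : PySem.Dict Int Int} {ρ : Int → Int} {dep : Int → Nat}
    (rk : PySem.Dict Int Int) (u v : Int)
    (hF : Forest p ρ dep) (hC : Closed p)
    (hu : p.contains u = true) (hv : p.contains v = true) :
    (pvUnionSets u v p rk).1 = decide (ρ u ≠ ρ v) ∧
      (∀ x, (pvUnionSets u v p rk).2.1.contains x = p.contains x) ∧
      (ρ u = ρ v → ∃ dep', Forest (pvUnionSets u v p rk).2.1 ρ dep' ∧
        Closed (pvUnionSets u v p rk).2.1) ∧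
      (ρ u ≠ ρ v → ∃ ρ' dep', Forest (pvUnionSets u v p rk).2.1 ρ' dep' ∧
        Closed (pvUnionSets u v p rk).2.1 ∧ MergeRel ρ ρ' (ρ u) (ρ v)) := by
  have hfu := fuel_enough hF hC u hu
  have h1 := find_spec p.size p u hF hC hfu
  set r1 := pvFindSet p.size u p with hr1
  have hcv1 : r1.2.contains v = true := by
    rw [h1.2.2.2]
    exact hv
  have hfu2 := fuel_enough h1.2.1 h1.2.2.1 v hcv1
  have h2 := find_spec r1.2.size r1.2 v h1.2.1 h1.2.2.1 hfu2
  set r2 := pvFindSet r1.2.size v r1.2 with hr2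
  have hunfold : pvUnionSets u v p rk =
      (if r1.1 ≠ r2.1 then
        if rk.getD r1.1 0 < rk.getD r2.1 0 then (true, r2.2.insert r1.1 r2.1, rk)
        else if rk.getD r1.1 0 > rk.getD r2.1 0 then (true, r2.2.insert r2.1 r1.1, rk)
        else (true, r2.2.insert r2.1 r1.1, rk.insert r1.1 (rk.getD r1.1 0 + 1))
      else (false, r2.2, rk)) := rfl
  have hce : ∀ x, r2.2.contains x = p.contains x := by
    intro x
    rw [h2.2.2.2, h1.2.2.2]
  rw [hunfold, h1.1, h2.1]
  by_cases hρ : ρ u = ρ v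
  · rw [if_neg (by simpa using hρ)]
    refine ⟨by simp [hρ], hce, ?_, ?_⟩
    · intro _
      exact ⟨dep, h2.2.1, h2.2.2.1⟩
    · intro hcon
      exact absurd hρ hcon
  · rw [if_pos hρ]
    have hrootu : pf r2.2 (ρ u) = ρ u := (rho_root h2.2.1 u).1
    have hrootv : pf r2.2 (ρ v) = ρ v := (rho_root h2.2.1 v).1
    have hcu' : r2.2.contains (ρ u) = true := by
      rw [hce]
      exact contains_rho hF hC u hu
    have hcv' : r2.2.contains (ρ v) = true := by
      rw [hce]
      exact contains_rho hF hC v hv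
    split_ifs with c1 c2
    · have hL := link_spec (ρ u) (ρ v) h2.2.1 h2.2.2.1 hrootu hrootv hρ hcu' hcv'
      refine ⟨by simp [hρ], ?_, fun hcon => absurd hcon hρ, ?_⟩
      · intro x
        rw [hL.2.2.1 x, hce]
      · intro _
        exact ⟨_, _, hL.1, hL.2.1, hL.2.2.2⟩
    · have hL := link_spec (ρ v) (ρ u) h2.2.1 h2.2.2.1 hrootv hrootu (Ne.symm hρ) hcv' hcu'
      refine ⟨by simp [hρ], ?_, fun hcon => absurd hcon hρ, ?_⟩
      · intro x
        rw [hL.2.2.1 x, hce]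
      · intro _
        exact ⟨_, _, hL.1, hL.2.1, mergeRel_symm hL.2.2.2⟩
    · have hL := link_spec (ρ v) (ρ u) h2.2.1 h2.2.2.1 hrootv hrootu (Ne.symm hρ) hcv' hcu'
      refine ⟨by simp [hρ], ?_, fun hcon => absurd hcon hρ, ?_⟩
      · intro x
        rw [hL.2.2.1 x, hce]
      · intro _
        exact ⟨_, _, hL.1, hL.2.1, mergeRel_symm hL.2.2.2⟩

lemma pf_setdefault (d : PySem.Dict Int Int) (k x : Int) :
    pf (d.setdefault k k) x = pf d x := by
  unfold PySem.Dict.setdefault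
  by_cases hk : d.contains k = true
  · simp [hk]
  · have hkf : d.contains k = false := by simpa using hk
    simp only [hkf, Bool.false_eq_true, if_false]
    have hnone : d.items.find? (fun p => p.1 == k) = none := by
      rw [List.find?_eq_none]
      intro y hy
      simp only [PySem.Dict.contains, List.any_eq_false] at hkf
      exact hkf y hy
    unfold pf
    simp only [PySem.Dict.getD, PySem.Dict.get?, PySem.Dict.items, List.find?_append]
    by_cases hx : x = k
    · subst hx
      rw [hnone]
      simp [List.find?]
    · have hkx : (k == x) = false := by simp [Ne.symm hx]
      have h2 : List.find? (fun p : Int × Int => p.1 == x) [(k, k)] = none := by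
        simp [List.find?, hkx]
      rw [h2]
      cases hfind : d.items.find? (fun p => p.1 == x) with
      | none => simp
      | some a => simp

lemma contains_setdefault (d : PySem.Dict Int Int) (k v x : Int) :
    (d.setdefault k v).contains x = (d.contains x || x == k) := by
  unfold PySem.Dict.setdefault
  by_cases hk : d.contains k = true
  · by_cases hx : x = k
    · subst hx; simp [hk]
    · simp [hx, hk]
  · have hkf : d.contains k = false := by simpa using hk
    simp only [hkf, Bool.false_eq_true, if_false]
    by_cases hx : x = k
    · subst hx
      simp [PySem.Dict.contains, List.any_append]
    · have hkx : (k == x) = false := by simp [Ne.symm hx]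
      simp [PySem.Dict.contains, List.any_append, hkx, hx]

lemma closed_setdefault (d : PySem.Dict Int Int) (k : Int) (hC : Closed d) :
    Closed (d.setdefault k k) := by
  intro v hv
  rw [pf_setdefault]
  by_cases hcv : d.contains v = true
  · have := hC v hcv
    rw [contains_setdefault, this]
    simp
  · have hvv : pf d v = v := pf_not_contains d v (by simpa using hcv)
    rw [hvv]
    exact hv

lemma contains_relabel (d : PySem.Dict Int Int) (la lb x : Int) :
    (PySem.Dict.mk (d.items.map (fun kv => (kv.1, if kv.2 == lb then la else kv.2)))).contains x
      = d.contains x := by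
  simp only [PySem.Dict.contains, PySem.Dict.items, List.any_map]
  congr 1

lemma pf_relabel (d : PySem.Dict Int Int) (la lb x : Int) (hlb : d.contains lb = true) :
    pf (PySem.Dict.mk (d.items.map (fun kv => (kv.1, if kv.2 == lb then la else kv.2)))) x
      = if pf d x = lb then la else pf d x := by
  unfold pf
  simp only [PySem.Dict.getD, PySem.Dict.get?, PySem.Dict.items, List.find?_map]
  have hcomp : ((fun p : Int × Int => p.1 == x) ∘
      (fun kv : Int × Int => (kv.1, if kv.2 == lb then la else kv.2)))
      = fun p : Int × Int => p.1 == x := by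
    funext p
    rfl
  rw [hcomp]
  cases hfind : d.items.find? (fun p => p.1 == x) with
  | none =>
    have hxc : d.contains x = false := by
      simp only [PySem.Dict.contains]
      rw [List.any_eq_false]
      intro y hy
      exact List.find?_eq_none.1 hfind y hy
    have hxlb : x ≠ lb := by
      intro h
      subst h
      rw [hlb] at hxc
      exact absurd hxc (by simp)
    simp [hxlb]
  | some a =>
    by_cases hv : a.2 = lb <;> simp [hv]

-- the counting view of B's first pass
def count1 : List (List Int) → Int
  | [] => 0
  | s :: r => (if s.length == 1 then 1 else 0) + count1 r

def edgesOf : List (List Int) → List (Int × Int)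
  | [] => []
  | s :: r =>
    if s.length == 1 then edgesOf r
    else if s.length == 2 then (PySem.List.pyGetD s 0 0, PySem.List.pyGetD s 1 0) :: edgesOf r
    else edgesOf r

lemma split_spec (sl : List (List Int)) :
    ∀ n es, sl.foldl pvSplit (n, es) = (n + count1 sl, es ++ edgesOf sl) := by
  induction sl with
  | nil => simp [count1, edgesOf]
  | cons s r ih =>
    intro n es
    simp only [List.foldl_cons, pvSplit, count1, edgesOf]
    by_cases h1 : s.length == 1
    · simp only [h1, if_true]
      rw [ih]
      simp [add_comm, add_assoc, add_left_comm]
    · simp only [h1, if_false]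
      by_cases h2 : s.length == 2
      · simp only [h2, if_true]
        rw [ih]
        have h1' : (s.length == 1) = false := by simpa using h1
        simp [h1', add_comm, add_assoc, add_left_comm]
      · simp only [h2, if_false]
        rw [ih]
        have h1' : (s.length == 1) = false := by simpa using h1
        have h2' : (s.length == 2) = false := by simpa using h2
        simp [h1', h2']

-- the main simulation: A's fold and B's merge fold stay linked
lemma merge_if_iff {la lb : Int} (h : la ≠ lb) (s t : Int) :
    ((if s = lb then la else s) = (if t = lb then la else t)) ↔
      (s = t ∨ ((s = la ∨ s = lb) ∧ (t = la ∨ t = lb))) := by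
  by_cases hs : s = lb <;> by_cases ht : t = lb
  · rw [if_pos hs, if_pos ht]
    simp [hs, ht]
  · rw [if_pos hs, if_neg ht]
    constructor
    · intro hh
      exact Or.inr ⟨Or.inr hs, Or.inl hh.symm⟩
    · rintro (hh | ⟨_, h2 | h2⟩)
      · exact absurd (hh ▸ hs) ht
      · exact h2.symm
      · exact absurd h2 ht
  · rw [if_neg hs, if_pos ht]
    constructor
    · intro hh
      exact Or.inr ⟨Or.inl hh, Or.inr ht⟩
    · rintro (hh | ⟨h1 | h1, _⟩)
      · exact absurd (hh.symm ▸ hs) (fun c => hs (hh ▸ ht))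
      · exact h1
      · exact absurd h1 hs
  · rw [if_neg hs, if_neg ht]
    constructor
    · intro hh
      exact Or.inl hh
    · rintro (hh | ⟨h1 | h1, h2 | h2⟩)
      · exact hh
      · rw [h1, h2]
      · exact absurd h2 ht
      · exact absurd h1 hs
      · exact absurd h1 hs

lemma pvMergeStep_eq (lab : PySem.Dict Int Int) (m : Int) (a b : Int) :
    pvMergeStep (lab, m) (a, b) =
      (if pf lab a ≠ pf lab b
       then (PySem.Dict.mk
          (((lab.setdefault a a).setdefault b b).items.map
            (fun kv => (kv.1, if kv.2 == pf lab b then pf lab a else kv.2))), m + 1)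
       else ((lab.setdefault a a).setdefault b b, m)) := by
  have hla : (lab.setdefault a a).getD a a = pf lab a := by
    rw [getD_eq_pf, pf_setdefault]
  have hlb : ((lab.setdefault a a).setdefault b b).getD b b = pf lab b := by
    rw [getD_eq_pf, pf_setdefault, pf_setdefault]
  show (if (lab.setdefault a a).getD a a ≠ ((lab.setdefault a a).setdefault b b).getD b b
      then (PySem.Dict.mk
          (((lab.setdefault a a).setdefault b b).items.map
            (fun kv => (kv.1,
              if kv.2 == ((lab.setdefault a a).setdefault b b).getD b b
              then (lab.setdefault a a).getD a a else kv.2))), m + 1)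
      else ((lab.setdefault a a).setdefault b b, m)) = _
  rw [hla, hlb]

-- the main simulation: A's fold and B's merge fold stay linked
lemma main_sim (sl : List (List Int)) :
    ∀ (b0 b1 : Int) (p rk lab : PySem.Dict Int Int) (m : Int),
      LinkedInv p lab →
      (∀ x, x ∈ sl.flatten → p.contains x = true) →
      (sl.foldl pvStepA (b0, b1, p, rk)).1
          = b0 + count1 sl + m - ((edgesOf sl).foldl pvMergeStep (lab, m)).2 ∧
        (sl.foldl pvStepA (b0, b1, p, rk)).2.1
          = b1 + (edgesOf sl).length + m - ((edgesOf sl).foldl pvMergeStep (lab, m)).2 := by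
  induction sl with
  | nil =>
    intro b0 b1 p rk lab m _ _
    constructor <;> simp [count1, edgesOf]
  | cons s r ih =>
    intro b0 b1 p rk lab m hInv hkeys
    simp only [List.foldl_cons]
    by_cases h1 : s.length = 1
    · have hb1 : (s.length == 1) = true := by simp [h1]
      have hstep : pvStepA (b0, b1, p, rk) s = (b0 + 1, b1, p, rk) := by
        simp [pvStepA, hb1]
      have hedge : edgesOf (s :: r) = edgesOf r := by
        simp [edgesOf, hb1]
      have hcnt : count1 (s :: r) = 1 + count1 r := by
        simp [count1, hb1]
      rw [hstep, hedge, hcnt]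
      have hk : ∀ x, x ∈ r.flatten → p.contains x = true := by
        intro x hx
        exact hkeys x (by
            obtain ⟨l, hl, hxl⟩ := List.mem_flatten.1 hx
            exact List.mem_flatten.2 ⟨l, List.mem_cons_of_mem _ hl, hxl⟩)
      obtain ⟨e1, e2⟩ := ih (b0 + 1) b1 p rk lab m hInv hk
      exact ⟨by rw [e1]; ring, by rw [e2]⟩
    · by_cases h2 : s.length = 2
      · obtain ⟨a, b, hs⟩ := List.length_eq_two.1 h2
        subst hs
        have hb1 : (([a, b] : List Int).length == 1) = false := by simp
        have hb2 : (([a, b] : List Int).length == 2) = true := by simp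
        have hga : PySem.List.pyGetD ([a, b] : List Int) 0 0 = a := rfl
        have hgb : PySem.List.pyGetD ([a, b] : List Int) 1 0 = b := rfl
        have hca : p.contains a = true := hkeys a (by simp)
        have hcb : p.contains b = true := hkeys b (by simp)
        obtain ⟨ρ, dep, hF, hC, hCl, hiff⟩ := hInv
        have hU := union_spec rk a b hF hC hca hcb
        have hstep : pvStepA (b0, b1, p, rk) ([a, b]) =
            (if (pvUnionSets a b p rk).1 then
              (b0 - 1, b1, (pvUnionSets a b p rk).2.1, (pvUnionSets a b p rk).2.2)
            else (b0, b1 + 1, (pvUnionSets a b p rk).2.1, (pvUnionSets a b p rk).2.2)) := by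
          simp only [pvStepA, hb1, hb2, hga, hgb]
          rfl
        have hedge : edgesOf ([a, b] :: r) = (a, b) :: edgesOf r := by
          simp [edgesOf, hb1, hb2, hga, hgb]
        have hcnt : count1 ([a, b] :: r) = count1 r := by
          simp [count1, hb1]
        have hk' : ∀ x, x ∈ r.flatten → (pvUnionSets a b p rk).2.1.contains x = true := by
          intro x hx
          rw [hU.2.1]
          exact hkeys x (by
            obtain ⟨l, hl, hxl⟩ := List.mem_flatten.1 hx
            exact List.mem_flatten.2 ⟨l, List.mem_cons_of_mem _ hl, hxl⟩)
        have hCl2 : Closed ((lab.setdefault a a).setdefault b b) :=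
          closed_setdefault _ b (closed_setdefault _ a hCl)
        have hpf2 : ∀ x, pf ((lab.setdefault a a).setdefault b b) x = pf lab x := by
          intro x
          rw [pf_setdefault, pf_setdefault]
        rw [hstep, hedge, hcnt]
        simp only [List.foldl_cons]
        rw [pvMergeStep_eq]
        by_cases hρ : ρ a = ρ b
        · have hla : pf lab a = pf lab b := (hiff a b).1 hρ
          have hcond : (pvUnionSets a b p rk).1 = false := by
            rw [hU.1]
            simp [hρ]
          rw [hcond, if_neg (by simpa using hla), if_neg (by simpa using hla)]
          obtain ⟨dep', hF', hC'⟩ := hU.2.2.1 hρ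
          have hInv' : LinkedInv (pvUnionSets a b p rk).2.1
              ((lab.setdefault a a).setdefault b b) := by
            refine ⟨ρ, dep', hF', hC', hCl2, ?_⟩
            intro x y
            rw [hpf2, hpf2]
            exact hiff x y
          obtain ⟨e1, e2⟩ := ih b0 (b1 + 1) _ (pvUnionSets a b p rk).2.2 _ m hInv' hk'
          refine ⟨by rw [e1], by rw [e2]; simp [List.length_cons]; ring⟩
        · have hla : pf lab a ≠ pf lab b := fun h => hρ ((hiff a b).2 h)
          have hcond : (pvUnionSets a b p rk).1 = true := by
            rw [hU.1]
            simp [hρ]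
          rw [hcond, if_pos rfl, if_pos hla]
          obtain ⟨ρ', dep', hF', hC', hM⟩ := hU.2.2.2 hρ
          set lab2 := (lab.setdefault a a).setdefault b b with hlab2
          have hb2c : lab2.contains b = true := by
            rw [hlab2, contains_setdefault]
            simp
          have ha2c : lab2.contains a = true := by
            rw [hlab2, contains_setdefault, contains_setdefault]
            simp
          have hlbkey : lab2.contains (pf lab b) = true := by
            have := hCl2 b hb2c
            rwa [hpf2] at this
          have hlakey : lab2.contains (pf lab a) = true := by
            have := hCl2 a ha2c
            rwa [hpf2] at this
          have hpfd : ∀ x, pf (PySem.Dict.mk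
              (lab2.items.map (fun kv => (kv.1, if kv.2 == pf lab b then pf lab a else kv.2)))) x
              = if pf lab x = pf lab b then pf lab a else pf lab x := by
            intro x
            rw [pf_relabel lab2 (pf lab a) (pf lab b) x hlbkey, hpf2]
          have hCld : Closed (PySem.Dict.mk
              (lab2.items.map (fun kv => (kv.1, if kv.2 == pf lab b then pf lab a else kv.2)))) := by
            intro x hx
            rw [contains_relabel] at hx
            rw [hpfd, contains_relabel]
            by_cases hxx : pf lab x = pf lab b
            · rw [if_pos hxx]
              exact hlakey
            · rw [if_neg hxx]
              have := hCl2 x hx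
              rwa [hpf2] at this
          have hiff' : ∀ x y, ρ' x = ρ' y ↔
              pf (PySem.Dict.mk
                (lab2.items.map (fun kv => (kv.1, if kv.2 == pf lab b then pf lab a else kv.2)))) x
              = pf (PySem.Dict.mk
                (lab2.items.map (fun kv => (kv.1, if kv.2 == pf lab b then pf lab a else kv.2)))) y := by
            intro x y
            rw [hpfd, hpfd, hM x y, merge_if_iff hla]
            constructor
            · rintro (h | ⟨hx, hy⟩)
              · exact Or.inl ((hiff x y).1 h)
              · refine Or.inr ⟨?_, ?_⟩
                · rcases hx with hx | hx
                  · exact Or.inl ((hiff x a).1 hx)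
                  · exact Or.inr ((hiff x b).1 hx)
                · rcases hy with hy | hy
                  · exact Or.inl ((hiff y a).1 hy)
                  · exact Or.inr ((hiff y b).1 hy)
            · rintro (h | ⟨hx, hy⟩)
              · exact Or.inl ((hiff x y).2 h)
              · refine Or.inr ⟨?_, ?_⟩
                · rcases hx with hx | hx
                  · exact Or.inl ((hiff x a).2 hx)
                  · exact Or.inr ((hiff x b).2 hx)
                · rcases hy with hy | hy
                  · exact Or.inl ((hiff y a).2 hy)
                  · exact Or.inr ((hiff y b).2 hy)
          have hInv' : LinkedInv (pvUnionSets a b p rk).2.1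
              (PySem.Dict.mk
                (lab2.items.map (fun kv => (kv.1, if kv.2 == pf lab b then pf lab a else kv.2)))) :=
            ⟨ρ', dep', hF', hC', hCld, hiff'⟩
          obtain ⟨e1, e2⟩ := ih (b0 - 1) b1 _ (pvUnionSets a b p rk).2.2 _ (m + 1) hInv' hk'
          refine ⟨by rw [e1]; ring, by rw [e2]; simp [List.length_cons]; ring⟩
      · have hb1 : (s.length == 1) = false := by simp [h1]
        have hb2 : (s.length == 2) = false := by simp [h2]
        have hstep : pvStepA (b0, b1, p, rk) s = (b0, b1, p, rk) := by
          simp [pvStepA, hb1, hb2]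
        have hedge : edgesOf (s :: r) = edgesOf r := by
          simp [edgesOf, hb1, hb2]
        have hcnt : count1 (s :: r) = count1 r := by
          simp [count1, hb1]
        rw [hstep, hedge, hcnt]
        exact ih b0 b1 p rk lab m hInv (by
          intro x hx
          exact hkeys x (by
            obtain ⟨l, hl, hxl⟩ := List.mem_flatten.1 hx
            exact List.mem_flatten.2 ⟨l, List.mem_cons_of_mem _ hl, hxl⟩))

lemma pf_init (l : List Int) :
    ∀ (d : PySem.Dict Int Int), (∀ x, pf d x = x) →
      ∀ x, pf (l.foldl (fun d x => d.insert x x) d) x = x := by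
  induction l with
  | nil => intro d hd x; exact hd x
  | cons y t ih =>
    intro d hd x
    refine ih (d.insert y y) ?_ x
    intro z
    rw [pf_insert]
    by_cases hz : z = y
    · rw [if_pos hz, hz]
    · rw [if_neg hz]
      exact hd z

lemma contains_init (l : List Int) :
    ∀ (d : PySem.Dict Int Int) (x : Int),
      (l.foldl (fun d x => d.insert x x) d).contains x = true ↔
        (d.contains x = true ∨ x ∈ l) := by
  induction l with
  | nil => intro d x; simp
  | cons y t ih =>
    intro d x
    rw [List.foldl_cons, ih]
    rw [PySem.Dict.contains_insert]
    by_cases hx : x = y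
    · subst hx
      simp
    · simp [hx]

lemma mem_addfold (l : List Int) :
    ∀ (sacc : PySem.Set Int) (x : Int),
      x ∈ l.foldl PySem.Set.add sacc ↔ (x ∈ sacc ∨ x ∈ l) := by
  induction l with
  | nil => intro sacc x; simp
  | cons y t ih =>
    intro sacc x
    rw [List.foldl_cons, ih, PySem.Set.mem_add]
    by_cases hx : x = y
    · subst hx
      simp
    · simp [hx]

lemma mem_vertfold (sl : List (List Int)) :
    ∀ (sacc : PySem.Set Int) (x : Int),
      x ∈ sl.foldl (fun s simplex => simplex.foldl PySem.Set.add s) sacc ↔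
        (x ∈ sacc ∨ x ∈ sl.flatten) := by
  induction sl with
  | nil => intro sacc x; simp
  | cons s r ih =>
    intro sacc x
    rw [List.foldl_cons, ih, mem_addfold]
    simp [List.flatten_cons, or_assoc]

-- ===== VERDICT (by name: the statement is the Claim_ definition above) =====
theorem calcular_numeros_betti_spec : Claim_equal_calcular_numeros_betti := by
  intro simplices _
  unfold Spec_calcular_numeros_betti
  simp only [calcular_numeros_betti, calcular_numeros_betti_alt]
  rw [split_spec simplices 0 []]
  simp only [List.nil_append, zero_add]
  set verts : PySem.Set Int :=
    simplices.foldl (fun s simplex => simplex.foldl PySem.Set.add s) ([] : PySem.Set Int)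
    with hverts
  set p0 := verts.foldl (fun d x => d.insert x x) PySem.Dict.empty with hp0
  set rk0 := verts.foldl (fun d x => d.insert x (0 : Int)) PySem.Dict.empty with hrk0
  have hpf0 : ∀ x, pf p0 x = x := by
    intro x
    rw [hp0]
    refine pf_init verts PySem.Dict.empty ?_ x
    intro z
    unfold pf
    rw [PySem.Dict.getD_empty]
  have hInv0 : LinkedInv p0 PySem.Dict.empty := by
    refine ⟨fun x => x, fun _ => 0, ?_, ?_, ?_, ?_⟩
    · intro v
      exact ⟨fun _ => rfl, fun h => absurd (hpf0 v) h⟩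
    · intro v hv
      rw [hpf0 v]
      exact hv
    · intro v hv
      rw [show (PySem.Dict.empty : PySem.Dict Int Int).contains v = false from rfl] at hv
      exact absurd hv (by simp)
    · intro x y
      unfold pf
      rw [PySem.Dict.getD_empty, PySem.Dict.getD_empty]
  have hkeys0 : ∀ x, x ∈ simplices.flatten → p0.contains x = true := by
    intro x hx
    rw [hp0, contains_init]
    right
    rw [hverts, mem_vertfold]
    exact Or.inr hx
  obtain ⟨e1, e2⟩ := main_sim simplices 0 0 p0 rk0 PySem.Dict.empty 0 hInv0 hkeys0
  refine Prod.ext ?_ ?_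
  · rw [e1]
    ring
  · rw [e2]
    ring
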